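-- pv_equiv track=rewrite | github.com/TirthPShah/PDEU-Sem-5 | Lab/Information Security/Lect3/HillCypher.py | shiftColsRight
-- ===== SOURCE A (Python) =====
-- def shiftColsRight(matr, key):
--
--     n = len(matr[0])
--
--     sumOfKey = 0
--
--     for i in key: # Get the sum of the ASCII values of the characters in the key
--         sumOfKey += ord(i)
--
--     shift = sumOfKey % n # Get the shift value
--
--     shifted_matrix = [[0] * n for _ in range(n)] # Initialize the shifted matrix
--
--     for i in range(0, n):
--         for j in range(0, n):
--             shifted_matrix[i][(j + shift) % n] = matr[i][j] # Shift the columns to the right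
--
--     return shifted_matrix
-- ===== SOURCE B (Python) =====
-- def shiftColsRight(matr, key):
--     n = len(matr[0])
--     shift = sum(ord(c) for c in key) % n
--     out = []
--     for i in range(n):
--         row = matr[i][:n]
--         out.append(row[n - shift:] + row[:n - shift])
--     return out
-- ===== Notes on version B (the rewrite author's own statement) =====
-- stated objective: simpler
-- what changed: Instead of allocating an n-by-n zero matrix and scattering each element to column (j+shift)%n, B builds each output row directly as the slice rotation row[n-shift:] + row[:n-shift] of the first n entries of matr[i], dropping the inner column loop and all modular index arithmetic.
import Mathlib
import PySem

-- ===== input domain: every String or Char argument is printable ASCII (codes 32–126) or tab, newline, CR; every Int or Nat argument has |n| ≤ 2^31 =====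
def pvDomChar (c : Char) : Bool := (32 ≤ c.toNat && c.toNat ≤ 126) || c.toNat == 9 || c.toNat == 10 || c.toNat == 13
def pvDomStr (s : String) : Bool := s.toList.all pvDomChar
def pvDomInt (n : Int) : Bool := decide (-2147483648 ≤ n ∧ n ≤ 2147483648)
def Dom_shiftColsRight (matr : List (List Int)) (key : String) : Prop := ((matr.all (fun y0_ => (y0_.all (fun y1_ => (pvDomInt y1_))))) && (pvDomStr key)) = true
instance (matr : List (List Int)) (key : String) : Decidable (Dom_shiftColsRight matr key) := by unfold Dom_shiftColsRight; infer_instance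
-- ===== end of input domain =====

-- B replaces A's scatter-by-modular-index into a preallocated zero matrix with a direct
-- slice rotation of each row (simpler decomposition; same cost).

-- ===== PORT A =====
-- Literal port of A: sum the key's ASCII codes, shift = sum % n, allocate an n×n zero
-- matrix, then scatter matr[i][j] to column (j+shift)%n.  The pyGetD/pySetD defaults are
-- unreachable under Pre_shiftColsRight (all indices in range).
def shiftColsRight (matr : List (List Int)) (key : String) : List (List Int) :=
  let n : Nat := (matr.headD []).length
  let sumOfKey : Int := key.toList.foldl (fun s c => s + (c.toNat : Int)) 0
  let shift : Int := PySem.Int.mod sumOfKey (n : Int)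
  let shifted : List (List Int) := (List.range n).map (fun _ => List.replicate n (0 : Int))
  (List.range n).foldl (fun m (i : Nat) =>
    (List.range n).foldl (fun m (j : Nat) =>
      PySem.List.pySetD m (i : Int)
        (PySem.List.pySetD (PySem.List.pyGetD m (i : Int) [])
          (PySem.Int.mod ((j : Int) + shift) (n : Int))
          (PySem.List.pyGetD (PySem.List.pyGetD matr (i : Int) []) (j : Int) 0))) m) shifted

-- ===== PORT B =====
-- Literal port of B: rotate each of the first n rows by slicing.
def shiftColsRight_alt (matr : List (List Int)) (key : String) : List (List Int) :=
  let n : Nat := (matr.headD []).length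
  let shift : Nat := (key.toList.foldl (fun s c => s + c.toNat) 0) % n
  (List.range n).foldl (fun out (i : Nat) =>
    let row := (PySem.List.pyGetD matr (i : Int) []).take n
    out ++ [row.drop (n - shift) ++ row.take (n - shift)]) []

-- ===== PRECONDITION & SPEC =====
-- Pre_ excludes exactly the inputs where A raises: empty matrix (IndexError), empty first
-- row (ZeroDivisionError on % n), fewer than n rows or a short row among the first n
-- (IndexError on matr[i][j]).
def Pre_shiftColsRight (matr : List (List Int)) (key : String) : Prop :=
  matr ≠ [] ∧ 0 < (matr.headD []).length ∧ (matr.headD []).length ≤ matr.length ∧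
    ∀ row ∈ matr.take (matr.headD []).length, (matr.headD []).length ≤ row.length
instance (matr : List (List Int)) (key : String) : Decidable (Pre_shiftColsRight matr key) := by
  unfold Pre_shiftColsRight; infer_instance

def pvWitness_shiftColsRight : List (List Int) × String := ([[1, 2, 3], [4, 5, 6], [7, 8, 9]], "ab")

def Spec_shiftColsRight (matr : List (List Int)) (key : String) (out : List (List Int)) : Prop := out = shiftColsRight_alt matr key
instance (matr : List (List Int)) (key : String) (out : List (List Int)) : Decidable (Spec_shiftColsRight matr key out) := by unfold Spec_shiftColsRight; infer_instance

-- ===== CLAIM (what is proved, stated in full; the proofs are below) =====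
def Claim_equal_shiftColsRight : Prop := ∀ (matr : List (List Int)) (key : String), Dom_shiftColsRight matr key → Pre_shiftColsRight matr key → Spec_shiftColsRight matr key (shiftColsRight matr key)

-- ===== LEMMAS AND PROOFS =====

theorem inner_set (js : List Nat) (i : Nat) (h : List Int → Nat → List Int) :
    ∀ (m : List (List Int)), i < m.length →
    js.foldl (fun m j => m.set i (h (m.getD i []) j)) m = m.set i (js.foldl h (m.getD i [])) := by
  induction js with
  | nil => intro m hi; simp [List.getD, List.getElem?_eq_getElem hi, List.set_getElem_self]
  | cons j js ih =>
    intro m hi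
    simp only [List.foldl_cons]
    rw [ih _ (by simpa using hi)]
    simp [List.getD, hi, List.set_set]

-- write a contiguous segment

theorem writeSeg (f : Nat → Int) : ∀ (m off : Nat) (l : List Int), off + m ≤ l.length →
    (List.range m).foldl (fun r j => r.set (off + j) (f j)) l
      = l.take off ++ (List.range m).map f ++ l.drop (off + m) := by
  intro m
  induction m with
  | zero => intro off l h; simp
  | succ m ih =>
    intro off l h
    rw [List.range_succ, List.foldl_append]
    rw [ih off l (by omega)]
    simp only [List.foldl_cons, List.foldl_nil]
    rw [List.set_append]
    have hlen : (l.take off ++ (List.range m).map f).length = off + m := by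
      simp [List.length_take]; omega
    simp only [hlen, lt_irrefl, Nat.sub_self]
    rw [List.drop_eq_getElem_cons (by omega : off + m < l.length), List.set_cons_zero]
    simp
    omega

theorem set_map_range {α : Type} (n k : Nat) (f : Nat → α) (x : α) (hk : k < n) :
    ((List.range n).map f).set k x = (List.range n).map (fun i => if i = k then x else f i) := by
  apply List.ext_getElem
  · simp
  · intro i h1 h2
    simp only [List.getElem_set, List.getElem_map, List.getElem_range]
    by_cases hi : i = k
    · simp [hi]
    · simp [hi, Ne.symm hi]

theorem nested_fold (n : Nat) (H : Nat → List Int → Nat → List Int) (z : List Int) :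
    ∀ k, k ≤ n →
    (List.range k).foldl (fun m i => (List.range n).foldl (fun m j => m.set i (H i (m.getD i []) j)) m)
        ((List.range n).map (fun _ => z))
      = (List.range n).map (fun i => if i < k then (List.range n).foldl (H i) z else z) := by
  intro k
  induction k with
  | zero => intro _; simp
  | succ k ih =>
    intro hk
    rw [List.range_succ, List.foldl_append, ih (by omega)]
    simp only [List.foldl_cons, List.foldl_nil]
    rw [inner_set (List.range n) k (H k) _ (by simpa using (by omega : k < n))]
    have hg : (((List.range n).map (fun i => if i < k then (List.range n).foldl (H i) z else z)).getD k []) = z := by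
      simp [List.getD, (by omega : k < n)]
    rw [hg, set_map_range n k _ _ (by omega)]
    apply List.map_congr_left
    intro i _
    by_cases h1 : i = k
    · simp [h1]
    · have hiff : (i < k + 1) ↔ (i < k) := by omega
      simp [h1, hiff]

theorem take_eq_map_range (l : List Int) (k : Nat) (_hk : k ≤ l.length) :
    l.take k = (List.range k).map (fun j => l.getD j 0) := by
  apply List.ext_getElem
  · simp; omega
  · intro i h1 h2
    simp only [List.getElem_take, List.getElem_map, List.getElem_range]
    have hi : i < l.length := by simp at h1; omega
    rw [List.getD_eq_getElem l 0 hi]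

theorem rowRot (l : List Int) (n s : Nat) (hs : s < n) (hl : n ≤ l.length) :
    (List.range n).foldl (fun r j => r.set ((j + s) % n) (l.getD j 0)) (List.replicate n (0:Int))
      = (l.take n).drop (n - s) ++ (l.take n).take (n - s) := by
  have hsplit : List.range n = List.range (n - s) ++ (List.range s).map ((n - s) + ·) := by
    rw [← List.range_add]; congr 1; omega
  rw [hsplit, List.foldl_append, List.foldl_map]
  have h1 : (List.range (n-s)).foldl (fun r j => r.set ((j + s) % n) (l.getD j 0)) (List.replicate n (0:Int))
      = List.replicate s (0:Int) ++ (List.range (n-s)).map (fun j => l.getD j 0) := by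
    rw [PySem.List.foldl_congr_mem (List.range (n-s))
          (fun (r : List Int) (j : Nat) => r.set ((j + s) % n) (l.getD j 0))
          (fun (r : List Int) (j : Nat) => r.set (s + j) (l.getD j 0)) _
          (by intro a x hx
              simp only [List.mem_range] at hx
              show a.set ((x + s) % n) (l.getD x 0) = a.set (s + x) (l.getD x 0)
              rw [Nat.mod_eq_of_lt (by omega), Nat.add_comm])]
    rw [writeSeg (fun j => l.getD j 0) (n-s) s (List.replicate n 0) (by simp; omega)]
    rw [show s + (n - s) = n by omega]
    simp [List.take_replicate, Nat.min_eq_left (by omega : s ≤ n)]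
  rw [h1]
  have h2 : (List.range s).foldl
        (fun r j => r.set ((n - s + j + s) % n) (l.getD (n - s + j) 0))
        (List.replicate s (0:Int) ++ (List.range (n-s)).map (fun j => l.getD j 0))
      = (List.range s).map (fun j => l.getD (n - s + j) 0) ++ (List.range (n-s)).map (fun j => l.getD j 0) := by
    rw [PySem.List.foldl_congr_mem (List.range s)
          (fun (r : List Int) (j : Nat) => r.set ((n - s + j + s) % n) (l.getD (n - s + j) 0))
          (fun (r : List Int) (j : Nat) => r.set (0 + j) (l.getD (n - s + j) 0)) _
          (by intro a x hx
              simp only [List.mem_range] at hx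
              show a.set ((n - s + x + s) % n) (l.getD (n - s + x) 0)
                  = a.set (0 + x) (l.getD (n - s + x) 0)
              rw [show n - s + x + s = n + x by omega, Nat.add_mod_left, Nat.mod_eq_of_lt (by omega),
                Nat.zero_add])]
    rw [writeSeg (fun j => l.getD (n - s + j) 0) s 0 _
        (by simp only [List.length_append, List.length_replicate, List.length_map,
              List.length_range]; omega)]
    simp
  rw [h2]
  congr 1
  · apply List.ext_getElem
    · simp; omega
    · intro i h1' h2'
      have hi : n - s + i < l.length := by simp at h1'; omega
      simp only [List.getElem_drop, List.getElem_map, List.getElem_range, List.getElem_take]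
      rw [List.getD_eq_getElem l 0 hi]
  · rw [List.take_take, Nat.min_eq_left (by omega), take_eq_map_range l (n-s) (by omega)]

theorem sum_ord_cast (l : List Char) : ∀ a : Nat,
    l.foldl (fun s c => s + (c.toNat : Int)) (a : Int)
      = ((l.foldl (fun s c => s + c.toNat) a : Nat) : Int) := by
  induction l with
  | nil => intro a; rfl
  | cons c l ih => intro a; simp only [List.foldl_cons]; rw [← Nat.cast_add]; exact ih _

-- ===== VERDICT (by name: the statement is the Claim_ definition above) =====
theorem shiftColsRight_spec : Claim_equal_shiftColsRight := by
  intro matr key _ hpre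
  obtain ⟨h1, h2, h3, h4⟩ := hpre
  unfold Spec_shiftColsRight shiftColsRight shiftColsRight_alt
  simp only [show ((0:Int)) = ((0:Nat):Int) from rfl, sum_ord_cast key.toList, PySem.Int.mod_natCast,
    PySem.List.pySetD_natCast, PySem.List.pyGetD_natCast]
  simp only [← Nat.cast_add, PySem.Int.mod_natCast, PySem.List.pySetD_natCast, Nat.cast_zero]
  rw [PySem.List.foldl_append_singleton_eq_map]
  rw [nested_fold (matr.headD []).length
      (fun i r j => r.set ((j + List.foldl (fun s c => s + c.toNat) 0 key.toList % (matr.headD []).length) % (matr.headD []).length)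
        ((matr.getD i []).getD j 0))
      (List.replicate (matr.headD []).length (0:Int)) (matr.headD []).length le_rfl]
  apply List.map_congr_left
  intro i hi
  simp only [List.mem_range] at hi
  rw [if_pos hi]
  have hrow : (matr.headD []).length ≤ (matr.getD i []).length := by
    have hgd : matr.getD i [] = matr[i]'(by omega) := List.getD_eq_getElem matr [] (by omega)
    have hmem : matr[i]'(by omega) ∈ matr.take (matr.headD []).length := by
      exact List.mem_take_iff_getElem.mpr ⟨i, by omega, rfl⟩
    rw [hgd]
    exact h4 _ hmem
  rw [rowRot (matr.getD i []) (matr.headD []).length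
      (List.foldl (fun s c => s + c.toNat) 0 key.toList % (matr.headD []).length)
      (Nat.mod_lt _ h2) hrow]
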